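-- pv_equiv track=rewrite | github.com/kavyakosaraju2/MAITRI-AI-Assistant | calendar_agent/calendar_reader.py | find_event_for_deletion
-- ===== SOURCE A (Python) =====
-- def find_event_for_deletion(events, query):
--
--     query = query.lower()
--
--     # 1️⃣ Exact title match
--     for event in events:
--         title = event.get("summary", "").lower()
--
--         if title in query:
--             return event
--
--     # 2️⃣ Partial match
--     for event in events:
--         title = event.get("summary", "").lower()
--
--         if any(word in title for word in query.split()):
--             return event
--
--     # 3️⃣ If user only says "the meeting", return most recent meeting
--     if "meeting" in query and events:
--         return events[0]
--
--     return None
-- ===== SOURCE B (Python) =====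
-- def find_event_for_deletion(events, query):
--     query = query.lower()
--     words = query.split()
--     first_partial = None
--     for event in events:
--         title = event.get("summary", "").lower()
--         if title in query:
--             return event
--         if first_partial is None and any(w in title for w in words):
--             first_partial = event
--     if first_partial is not None:
--         return first_partial
--     if "meeting" in query and events:
--         return events[0]
--     return None
-- ===== Notes on version B (the rewrite author's own statement) =====
-- stated objective: alternative
-- what changed: Replaces A's two priority scans over the event list with a single pass carrying a first-partial-match candidate (exact match returns immediately, the earliest partial match is kept as state), with query.split() computed once instead of per event.
import Mathlib
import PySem

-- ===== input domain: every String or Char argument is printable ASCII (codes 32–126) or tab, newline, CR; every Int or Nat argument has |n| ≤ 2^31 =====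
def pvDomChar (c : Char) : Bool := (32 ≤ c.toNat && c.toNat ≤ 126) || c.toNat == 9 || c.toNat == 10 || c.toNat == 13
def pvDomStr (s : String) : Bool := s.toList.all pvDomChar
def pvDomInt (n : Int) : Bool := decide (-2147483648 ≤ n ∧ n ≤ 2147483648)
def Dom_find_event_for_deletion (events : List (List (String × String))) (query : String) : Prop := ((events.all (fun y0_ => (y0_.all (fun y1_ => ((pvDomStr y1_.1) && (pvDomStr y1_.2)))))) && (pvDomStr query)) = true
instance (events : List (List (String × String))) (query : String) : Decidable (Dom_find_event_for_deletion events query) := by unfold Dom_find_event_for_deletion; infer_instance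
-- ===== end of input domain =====

-- One honest line: B folds A's two priority scans into a single pass that keeps the
-- earliest partial match as a candidate while exact matches return immediately (objective: alternative).

-- ===== PORT A =====
-- event.get("summary", "").lower()
def pvTitle (event : List (String × String)) : String :=
  PySem.Str.lower (PySem.Dict.getD (PySem.Dict.mk event) "summary" "")

-- pass 1: first event whose title is a substring of query
def pvExactScan (q : String) : List (List (String × String)) → Option (List (String × String))
  | [] => none
  | event :: rest =>
      if PySem.Str.isIn (pvTitle event) q then some event else pvExactScan q rest

-- pass 2: first event whose title contains some word of query.split()
def pvPartialScan (q : String) : List (List (String × String)) → Option (List (String × String))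
  | [] => none
  | event :: rest =>
      if (PySem.Str.split₀ q).any (fun word => PySem.Str.isIn word (pvTitle event)) then
        some event
      else pvPartialScan q rest

def find_event_for_deletion (events : List (List (String × String))) (query : String) :
    Option (List (String × String)) :=
  let q := PySem.Str.lower query
  match pvExactScan q events with
  | some event => some event
  | none =>
    match pvPartialScan q events with
    | some event => some event
    | none =>
      if PySem.Str.isIn "meeting" q && !events.isEmpty then events.head? else none

-- ===== PORT B =====
-- single pass: exact match returns at once; earliest partial match is carried as state
def pvScan (q : String) (words : List String) :
    List (List (String × String)) → Option (List (String × String)) →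
    Option (List (String × String))
  | [], firstPartial => firstPartial
  | event :: rest, firstPartial =>
      let title := pvTitle event
      if PySem.Str.isIn title q then some event
      else
        pvScan q words rest
          (if firstPartial.isNone && words.any (fun w => PySem.Str.isIn w title) then
            some event
          else firstPartial)

def find_event_for_deletion_alt (events : List (List (String × String))) (query : String) :
    Option (List (String × String)) :=
  let q := PySem.Str.lower query
  match pvScan q (PySem.Str.split₀ q) events none with
  | some event => some event
  | none =>
      if PySem.Str.isIn "meeting" q && !events.isEmpty then events.head? else none

-- ===== PRECONDITION & SPEC =====
def Spec_find_event_for_deletion (events : List (List (String × String))) (query : String) (out : Option (List (String × String))) : Prop := out = find_event_for_deletion_alt events query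
instance (events : List (List (String × String))) (query : String) (out : Option (List (String × String))) : Decidable (Spec_find_event_for_deletion events query out) := by unfold Spec_find_event_for_deletion; infer_instance

-- ===== CLAIM (what is proved, stated in full; the proofs are below) =====
def Claim_equal_find_event_for_deletion : Prop := ∀ (events : List (List (String × String))) (query : String), Dom_find_event_for_deletion events query → Spec_find_event_for_deletion events query (find_event_for_deletion events query)

-- ===== LEMMAS AND PROOFS =====

-- B's scan = A's exact scan, falling back to the carried candidate, then A's partial scan
theorem pvScan_eq (q : String) (es : List (List (String × String)))
    (fp : Option (List (String × String))) :
    pvScan q (PySem.Str.split₀ q) es fp =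
      ((pvExactScan q es).or (fp.or (pvPartialScan q es))) := by
  induction es generalizing fp with
  | nil => simp [pvScan, pvExactScan, pvPartialScan]
  | cons e rest ih =>
    simp only [pvScan, pvExactScan, pvPartialScan, PySem.Str.isIn_eq, List.any_eq_true,
      Bool.and_eq_true]
    by_cases hx : PySem.Chars.isIn (pvTitle e).toList q.toList = true
    · simp [hx]
    · by_cases hp : ∃ x ∈ PySem.Str.split₀ q, PySem.Chars.isIn x.toList (pvTitle e).toList = true
      · cases fp <;> simp [hx, hp, ih]
      · cases fp <;> simp [hx, hp, ih]

-- ===== VERDICT (by name: the statement is the Claim_ definition above) =====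
theorem find_event_for_deletion_spec : Claim_equal_find_event_for_deletion := by
  intro events query _
  unfold Spec_find_event_for_deletion find_event_for_deletion find_event_for_deletion_alt
  simp only [pvScan_eq]
  cases hx : pvExactScan (PySem.Str.lower query) events with
  | some e => simp
  | none =>
    cases hp : pvPartialScan (PySem.Str.lower query) events with
    | some e => simp
    | none => simp
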